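-- pv_equiv track=rewrite | github.com/rcamilo1526/Data_Science_introduction | cubospfor.py | obtenercubo
-- ===== SOURCE A (Python) =====
-- def obtenercubo(id1,x,y,z):
--     if(id1<27):
--
--         a = [x,y,z]
--         if(id1>0):
--             if(x<6):
--                 x=x+3
--                 if(y>8):
--                     y=0
--
--                 a = obtenercubo(id1-1,x,y,z)
--
--             else:
--                 x=0
--                 y=y+3
--                 if(y>8):
--                     y=0
--                     z=z+3
--
--                 a = obtenercubo(id1-1,x,y,z)
--
--
--         return a
-- ===== SOURCE B (Python) =====
-- def obtenercubo(id1, x, y, z):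
--     if id1 >= 27:
--         return None
--     for _ in range(id1):
--         if x < 6:
--             x += 3
--             if y > 8:
--                 y = 0
--         else:
--             x = 0
--             y += 3
--             if y > 8:
--                 y = 0
--                 z += 3
--     return [x, y, z]
-- ===== Notes on version B (the rewrite author's own statement) =====
-- stated objective: idiomatic
-- what changed: Replaces the tail recursion (with an accumulator variable a) by an early None return for id1>=27 followed by an explicit for-loop running id1 times over the mutable coordinates.
import Mathlib
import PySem

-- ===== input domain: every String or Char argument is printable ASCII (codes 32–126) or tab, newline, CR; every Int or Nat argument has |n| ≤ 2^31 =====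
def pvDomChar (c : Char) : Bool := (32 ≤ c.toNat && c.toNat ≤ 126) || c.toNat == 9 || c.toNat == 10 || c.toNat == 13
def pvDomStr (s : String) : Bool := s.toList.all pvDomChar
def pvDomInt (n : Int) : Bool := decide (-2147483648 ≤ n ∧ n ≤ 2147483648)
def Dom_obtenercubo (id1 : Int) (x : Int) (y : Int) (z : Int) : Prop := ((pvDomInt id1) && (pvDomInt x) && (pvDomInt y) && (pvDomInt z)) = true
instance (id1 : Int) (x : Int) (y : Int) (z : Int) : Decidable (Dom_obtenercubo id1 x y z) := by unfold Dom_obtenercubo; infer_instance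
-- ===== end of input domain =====

-- B replaces A's tail recursion by an early None return plus an explicit loop run id1 times (idiomatic decomposition; same cost).


-- ===== PORT A =====
-- literal transliteration of A's recursion: a starts as [x,y,z], is overwritten by the
-- recursive call when id1>0, and the function falls through (None) when id1 ≥ 27
def obtenercubo (id1 : Int) (x : Int) (y : Int) (z : Int) : Option (List Int) :=
  if id1 < 27 then
    if id1 > 0 then
      if x < 6 then
        obtenercubo (id1 - 1) (x + 3) (if y > 8 then 0 else y) z
      else
        if y + 3 > 8 then
          obtenercubo (id1 - 1) 0 0 (z + 3)
        else
          obtenercubo (id1 - 1) 0 (y + 3) z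
    else
      some [x, y, z]
  else
    none
termination_by id1.toNat
decreasing_by all_goals omega

-- ===== PORT B =====
-- one body of Source B's for-loop
def pvStep (s : Int × Int × Int) : Int × Int × Int :=
  if s.1 < 6 then
    (s.1 + 3, if s.2.1 > 8 then 0 else s.2.1, s.2.2)
  else
    if s.2.1 + 3 > 8 then (0, 0, s.2.2 + 3) else (0, s.2.1 + 3, s.2.2)

def obtenercubo_alt (id1 : Int) (x : Int) (y : Int) (z : Int) : Option (List Int) :=
  if 27 ≤ id1 then none
  else
    let s := (List.range id1.toNat).foldl (fun s _ => pvStep s) (x, y, z)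
    some [s.1, s.2.1, s.2.2]

-- ===== PRECONDITION & SPEC =====
def Spec_obtenercubo (id1 : Int) (x : Int) (y : Int) (z : Int) (out : Option (List Int)) : Prop := out = obtenercubo_alt id1 x y z
instance (id1 : Int) (x : Int) (y : Int) (z : Int) (out : Option (List Int)) : Decidable (Spec_obtenercubo id1 x y z out) := by unfold Spec_obtenercubo; infer_instance

-- ===== CLAIM (what is proved, stated in full; the proofs are below) =====
def Claim_equal_obtenercubo : Prop := ∀ (id1 : Int) (x : Int) (y : Int) (z : Int), Dom_obtenercubo id1 x y z → Spec_obtenercubo id1 x y z (obtenercubo id1 x y z)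

-- ===== LEMMAS AND PROOFS =====
-- folding the step over range (n+1) = fold over range n after one step (the fold ignores the index)
lemma pv_fold_succ (n : Nat) (s : Int × Int × Int) :
    (List.range (n + 1)).foldl (fun s _ => pvStep s) s
      = (List.range n).foldl (fun s _ => pvStep s) (pvStep s) := by
  induction n generalizing s with
  | zero => simp [List.range_succ]
  | succ n ih =>
      have h := ih s
      simp only [List.range_succ, List.foldl_append, List.foldl_cons, List.foldl_nil] at h ⊢
      rw [h]

lemma pv_main (n : Nat) : ∀ (id1 x y z : Int), id1.toNat = n → id1 < 27 →
    obtenercubo id1 x y z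
      = some (let s := (List.range n).foldl (fun s _ => pvStep s) (x, y, z)
              [s.1, s.2.1, s.2.2]) := by
  induction n with
  | zero =>
      intro id1 x y z hn h27
      have h0 : ¬ id1 > 0 := by omega
      rw [obtenercubo]
      simp [h27, h0]
  | succ n ih =>
      intro id1 x y z hn h27
      have h0 : id1 > 0 := by omega
      have hn' : (id1 - 1).toNat = n := by omega
      have h27' : id1 - 1 < 27 := by omega
      rw [obtenercubo]
      simp only [h27, h0, if_true]
      rw [pv_fold_succ]
      by_cases hx : x < 6
      · simp only [hx, if_true]
        rw [ih (id1 - 1) _ _ _ hn' h27']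
        by_cases hy : y > 8 <;> simp [pvStep, hx, hy]
      · simp only [hx, if_false]
        by_cases hy : y + 3 > 8
        · simp only [hy, if_true]
          rw [ih (id1 - 1) _ _ _ hn' h27']
          simp [pvStep, hx, hy]
        · simp only [hy, if_false]
          rw [ih (id1 - 1) _ _ _ hn' h27']
          simp [pvStep, hx, hy]

-- ===== VERDICT (by name: the statement is the Claim_ definition above) =====
theorem obtenercubo_spec : Claim_equal_obtenercubo := by
  intro id1 x y z _
  unfold Spec_obtenercubo obtenercubo_alt
  by_cases h : 27 ≤ id1
  · have h27 : ¬ id1 < 27 := by omega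
    rw [obtenercubo]
    simp [h, h27]
  · have h27 : id1 < 27 := by omega
    rw [pv_main id1.toNat id1 x y z rfl h27]
    simp [h]
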